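-- pv_equiv track=rewrite | github.com/bplangley/MachineLearning | Naive Bayes Email Filtering/bin/prj4.py | countedWords
-- ===== SOURCE A (Python) =====
-- def countedWords(text, is_spam, counted, stopWords):
--     for word in text:
--         if word in counted and word not in stopWords:
--             if is_spam==1:
--                 counted[word][1]=counted[word][1]+1
--             else:
--                 counted[word][0]=counted[word][0]+1
--         elif word not in stopWords:
--             if is_spam==1:
--                 counted[word]=[0,1]
--             else:
--                 counted[word]=[1,0]
--     return counted
-- ===== SOURCE B (Python) =====
-- def countedWords(text, is_spam, counted, stopWords):
--     # two-phase: aggregate counts of non-stopwords first, then merge into counted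
--     stop = set(stopWords)
--     c = {}
--     for w in text:
--         if w not in stop:
--             c[w] = c.get(w, 0) + 1
--     idx = 1 if is_spam == 1 else 0
--     for w, n in c.items():
--         if w not in counted:
--             counted[w] = [0, 0]
--         counted[w][idx] += n
--     return counted
-- ===== Notes on version B (the rewrite author's own statement) =====
-- stated objective: faster
-- what changed: A increments once per word occurrence with a linear stopword-list scan per word; B first aggregates the non-stopword occurrences into a count table (stopwords held in a set), then merges that table into counted in a second pass, once per distinct word.
import Mathlib
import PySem

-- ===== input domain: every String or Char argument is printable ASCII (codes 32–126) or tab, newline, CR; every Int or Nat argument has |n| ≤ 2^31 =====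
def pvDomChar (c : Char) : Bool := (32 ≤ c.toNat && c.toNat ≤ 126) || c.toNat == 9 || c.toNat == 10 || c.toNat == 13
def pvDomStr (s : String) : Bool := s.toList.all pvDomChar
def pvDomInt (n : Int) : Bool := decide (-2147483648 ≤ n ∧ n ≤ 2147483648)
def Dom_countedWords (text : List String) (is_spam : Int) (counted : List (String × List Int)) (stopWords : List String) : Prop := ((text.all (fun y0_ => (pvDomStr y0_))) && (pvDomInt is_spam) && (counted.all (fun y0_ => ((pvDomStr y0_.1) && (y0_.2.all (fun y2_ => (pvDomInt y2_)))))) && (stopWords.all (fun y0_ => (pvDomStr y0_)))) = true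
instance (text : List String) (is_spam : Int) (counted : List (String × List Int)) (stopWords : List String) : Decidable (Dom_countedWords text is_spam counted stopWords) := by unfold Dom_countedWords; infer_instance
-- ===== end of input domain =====

-- B replaces A's one-increment-per-occurrence loop (with a stopword-list scan per word) by a
-- two-phase aggregate-then-merge pass: a count table over the non-stopwords (stopwords held
-- in a set) is built first and then merged into `counted` once per distinct word.
-- The Python A mutates `counted` in place and returns it; B performs the same in-place
-- mutation, and the equivalence proved here is about the returned dict.

-- ===== PORT A =====
def countedWords (text : List String) (is_spam : Int) (counted : List (String × List Int)) (stopWords : List String) : List (String × List Int) :=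
  (List.foldl (fun d word =>
      if d.contains word && !(stopWords.contains word) then
        (if is_spam = 1 then
          d.modify word [] (fun v => v.set 1 (v.getD 1 0 + 1))
        else
          d.modify word [] (fun v => v.set 0 (v.getD 0 0 + 1)))
      else if !(stopWords.contains word) then
        (if is_spam = 1 then d.insert word [0, 1] else d.insert word [1, 0])
      else d)
    (PySem.Dict.empty.update counted) text).items

-- ===== PORT B =====
def countedWords_alt (text : List String) (is_spam : Int) (counted : List (String × List Int)) (stopWords : List String) : List (String × List Int) :=
  let stop : PySem.Set String := PySem.Set.ofList stopWords
  let c : PySem.Dict String Int :=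
    List.foldl (fun c w => if !(stop.contains w) then c.insert w (c.getD w 0 + 1) else c)
      PySem.Dict.empty text
  let idx : Nat := if is_spam = 1 then 1 else 0
  (List.foldl (fun d p =>
      let d1 := if !(d.contains p.1) then d.insert p.1 ([0, 0] : List Int) else d
      d1.modify p.1 [] (fun v => v.set idx (v.getD idx 0 + p.2)))
    (PySem.Dict.empty.update counted) c.items).items

-- ===== PRECONDITION & SPEC =====
-- Pre_ excludes exactly the inputs on which the Python A raises IndexError: a non-stopword of
-- `text` already present in the dict built from `counted` whose value list is too short for the
-- index A writes (index 1 when is_spam == 1, else index 0).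
def Pre_countedWords (text : List String) (is_spam : Int) (counted : List (String × List Int)) (stopWords : List String) : Prop :=
  ∀ w ∈ text, stopWords.contains w = false →
    (((PySem.Dict.empty.update counted).get? w).all
      (fun v => decide (if is_spam = 1 then 2 ≤ v.length else 1 ≤ v.length))) = true
instance (text : List String) (is_spam : Int) (counted : List (String × List Int)) (stopWords : List String) : Decidable (Pre_countedWords text is_spam counted stopWords) := by unfold Pre_countedWords; infer_instance

def pvWitness_countedWords : List String × Int × (List (String × List Int)) × List String :=
  (["spam", "egg", "spam"], 1, [("egg", [2, 3])], ["the"])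

def Spec_countedWords (text : List String) (is_spam : Int) (counted : List (String × List Int)) (stopWords : List String) (out : List (String × List Int)) : Prop := out = countedWords_alt text is_spam counted stopWords
instance (text : List String) (is_spam : Int) (counted : List (String × List Int)) (stopWords : List String) (out : List (String × List Int)) : Decidable (Spec_countedWords text is_spam counted stopWords out) := by unfold Spec_countedWords; infer_instance

-- ===== CLAIM (what is proved, stated in full; the proofs are below) =====
def Claim_equal_countedWords : Prop := ∀ (text : List String) (is_spam : Int) (counted : List (String × List Int)) (stopWords : List String), Dom_countedWords text is_spam counted stopWords → Pre_countedWords text is_spam counted stopWords → Spec_countedWords text is_spam counted stopWords (countedWords text is_spam counted stopWords)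

-- ===== LEMMAS AND PROOFS =====

-- the value update both programs perform at list index `idx`
def pvBump (idx : Nat) (n : Int) (v : List Int) : List Int := v.set idx (v.getD idx 0 + n)

-- the per-key step both loops share: ensure the key is present (default [0,0]), then bump by n
def pvStep (idx : Nat) (d : PySem.Dict String (List Int)) (w : String) (n : Int) : PySem.Dict String (List Int) :=
  let d' := if d.contains w then d else d.insert w [0, 0]
  d'.insert w (pvBump idx n (d'.getD w []))

theorem pvBump_bump (idx : Nat) (a b : Int) (v : List Int) :
    pvBump idx b (pvBump idx a v) = pvBump idx (a + b) v := by
  unfold pvBump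
  by_cases h : idx < v.length
  · rw [List.getD_eq_getElem?_getD (l := v.set idx (v.getD idx 0 + a)),
        List.getElem?_set_self (by simpa using h), List.set_set]
    simp only [Option.getD_some]
    ring_nf
  · rw [List.set_eq_of_length_le (by simp; omega)]
    rw [List.set_eq_of_length_le (by omega), List.set_eq_of_length_le (by omega)]

theorem contains_eq_keys_contains (d : PySem.Dict String (List Int)) (k : String) :
    d.contains k = d.keys.contains k := by
  by_cases h : k ∈ d.keys
  · simp_all [PySem.Dict.contains, PySem.Dict.keys, List.mem_map]
  · simp_all [PySem.Dict.contains, PySem.Dict.keys, List.mem_map]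
    intro a b hm hk
    exact h b (hk ▸ hm)

theorem keys_insert_dict (d : PySem.Dict String (List Int)) (k : String) (v : List Int) :
    (d.insert k v).keys = if d.contains k then d.keys else d.keys ++ [k] := by
  by_cases h : d.contains k
  · simp only [PySem.Dict.insert, h, if_true, PySem.Dict.keys, List.map_map]
    refine List.map_congr_left ?_
    intro p _
    by_cases hp : p.1 = k
    · simp [hp]
    · simp [hp]
  · simp [PySem.Dict.insert, h, PySem.Dict.keys]

theorem keys_pvStep (idx : Nat) (d : PySem.Dict String (List Int)) (w : String) (n : Int) :
    (pvStep idx d w n).keys = PySem.Set.add d.keys w := by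
  unfold pvStep PySem.Set.add PySem.Set.contains
  rw [← contains_eq_keys_contains]
  by_cases h : d.contains w
  · simp [h, keys_insert_dict]
  · have h2 : (d.insert w [0,0]).contains w := by
      simp
    simp [h, keys_insert_dict, h2]

theorem get?_pvStep (idx : Nat) (d : PySem.Dict String (List Int)) (w k : String) (n : Int) :
    (pvStep idx d w n).get? k =
      if k = w then some (pvBump idx n ((d.get? w).getD [0, 0])) else d.get? k := by
  unfold pvStep
  by_cases h : d.contains w
  · obtain ⟨v, hv⟩ : ∃ v, d.get? w = some v := by
      cases hg : d.get? w
      · rw [PySem.Dict.get?_eq_none_iff_contains] at hg; simp [hg] at h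
      · exact ⟨_, rfl⟩
    by_cases hk : k = w
    · subst hk
      simp [h, PySem.Dict.get?_insert_self, PySem.Dict.getD, hv]
    · simp [h, PySem.Dict.get?_insert_of_ne _ _ hk, hk]
  · have hv : d.get? w = none := by
      rw [PySem.Dict.get?_eq_none_iff_contains]; simpa using h
    by_cases hk : k = w
    · subst hk
      simp [h, PySem.Dict.get?_insert_self, PySem.Dict.getD, hv]
    · simp [h, PySem.Dict.get?_insert_of_ne _ _ hk, hk]

theorem keys_foldA (idx : Nat) (ft : List String) (d : PySem.Dict String (List Int)) :
    (List.foldl (fun d w => pvStep idx d w 1) d ft).keys = PySem.Set.update d.keys ft := by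
  induction ft generalizing d with
  | nil => rfl
  | cons w ft ih =>
    simp only [List.foldl_cons, ih, PySem.Set.update, List.foldl_cons, keys_pvStep]

theorem keys_foldB (idx : Nat) (l : List (String × Int)) (d : PySem.Dict String (List Int)) :
    (List.foldl (fun d p => pvStep idx d p.1 p.2) d l).keys =
      PySem.Set.update d.keys (l.map Prod.fst) := by
  induction l generalizing d with
  | nil => rfl
  | cons p l ih =>
    simp only [List.foldl_cons, ih, List.map_cons, PySem.Set.update, List.foldl_cons, keys_pvStep]

theorem set_update_ofList (s : PySem.Set String) (l : List String) :
    PySem.Set.update s (PySem.Set.ofList l) = PySem.Set.update s l := by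
  induction l using List.reverseRecOn with
  | nil => rfl
  | append_singleton l x ih =>
    have hof : PySem.Set.ofList (l ++ [x]) = PySem.Set.add (PySem.Set.ofList l) x := by
      simp [PySem.Set.ofList, List.foldl_append]
    by_cases h : x ∈ PySem.Set.ofList l
    · have hxl : x ∈ l := (PySem.Set.mem_ofList l x).mp h
      have hadd : PySem.Set.add (PySem.Set.ofList l) x = PySem.Set.ofList l := by
        simp [PySem.Set.add, h]
      have hx2 : x ∈ List.foldl PySem.Set.add s l := (PySem.Set.mem_update s l x).mpr (Or.inr hxl)
      rw [hof, hadd, ih]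
      simp [PySem.Set.update, List.foldl_append, PySem.Set.add, hx2]
    · have hadd : PySem.Set.add (PySem.Set.ofList l) x = PySem.Set.ofList l ++ [x] := by
        simp [PySem.Set.add, h]
      rw [hof, hadd]
      simp only [PySem.Set.update, List.foldl_append] at *
      rw [ih]

theorem get?_foldA (idx : Nat) (ft : List String) (d : PySem.Dict String (List Int)) (k : String) :
    (List.foldl (fun d w => pvStep idx d w 1) d ft).get? k =
      if ft.count k = 0 then d.get? k
      else some (pvBump idx (ft.count k) ((d.get? k).getD [0, 0])) := by
  induction ft generalizing d with
  | nil => simp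
  | cons w ft ih =>
    simp only [List.foldl_cons, ih, get?_pvStep]
    by_cases hk : k = w
    · subst hk
      rw [if_pos rfl, List.count_cons_self]
      by_cases h0 : ft.count k = 0
      · simp [h0, pvBump]
      · rw [if_neg h0, if_neg (by omega), Option.getD_some, pvBump_bump]
        congr 2
        push_cast
        omega
    · simp [hk, List.count_cons_of_ne (by exact fun h => hk h.symm)]

theorem get?_foldB_not_mem (idx : Nat) (l : List (String × Int)) (d : PySem.Dict String (List Int))
    (k : String) (h : k ∉ l.map Prod.fst) :
    (List.foldl (fun d p => pvStep idx d p.1 p.2) d l).get? k = d.get? k := by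
  induction l generalizing d with
  | nil => rfl
  | cons p l ih =>
    simp only [List.map_cons, List.mem_cons, not_or] at h
    simp only [List.foldl_cons, ih _ h.2, get?_pvStep, if_neg h.1]

theorem get?_foldB (idx : Nat) (l : List (String × Int)) (d : PySem.Dict String (List Int))
    (k : String) (h : (l.map Prod.fst).Nodup) :
    (List.foldl (fun d p => pvStep idx d p.1 p.2) d l).get? k =
      match l.find? (fun p => p.1 == k) with
      | some p => some (pvBump idx p.2 ((d.get? k).getD [0, 0]))
      | none => d.get? k := by
  induction l generalizing d with
  | nil => rfl
  | cons p l ih =>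
    simp only [List.map_cons, List.nodup_cons] at h
    by_cases hk : p.1 = k
    · subst hk
      rw [List.foldl_cons, get?_foldB_not_mem idx l _ p.1 h.1, get?_pvStep, if_pos rfl,
          List.find?_cons_of_pos (by simp)]
    · have hd' : (pvStep idx d p.1 p.2).get? k = d.get? k := by
        rw [get?_pvStep, if_neg (fun hkk => hk hkk.symm)]
      rw [List.foldl_cons, ih _ h.2, hd', List.find?_cons_of_neg (by simpa using hk)]

theorem find?_beq (s : List String) (k : String) :
    s.find? (fun w => w == k) = if k ∈ s then some k else none := by
  induction s with
  | nil => simp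
  | cons a s ih =>
    by_cases ha : a = k
    · subst ha; simp
    · rw [List.find?_cons_of_neg (by simpa using ha), ih]
      simp [show ¬ k = a from fun h => ha h.symm]

theorem foldl_filter_guard {α : Type} (p : String → Bool)
    (g : α → String → α) (l : List String) (d : α) :
    List.foldl (fun d w => if !(p w) then g d w else d) d l =
      List.foldl g d (l.filter (fun w => !(p w))) := by
  induction l generalizing d with
  | nil => rfl
  | cons w l ih =>
    rw [List.foldl_cons]
    by_cases h : p w
    · rw [show (if (!p w) = true then g d w else d) = d by simp [h],
          List.filter_cons_of_neg (by simp [h])]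
      exact ih d
    · rw [show (if (!p w) = true then g d w else d) = g d w by simp [h],
          List.filter_cons_of_pos (by simp [h]), List.foldl_cons]
      exact ih (g d w)

theorem contains_ofList (s : List String) (w : String) :
    (PySem.Set.ofList s).contains w = s.contains w := by
  by_cases h : w ∈ s
  · have := (PySem.Set.mem_ofList s w).mpr h
    simp_all [PySem.Set.contains]
  · have := fun hh => h ((PySem.Set.mem_ofList s w).mp hh)
    simp_all [PySem.Set.contains]

-- the central fact: bumping once per occurrence equals bumping once per distinct word by its count
theorem fold_occurrences_eq_fold_counter (idx : Nat) (ft : List String)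
    (d : PySem.Dict String (List Int)) (hnd : d.keys.Nodup) :
    (List.foldl (fun d w => pvStep idx d w 1) d ft).items =
      (List.foldl (fun d p => pvStep idx d p.1 p.2) d (PySem.Dict.counter ft).items).items := by
  have hmapfst : (PySem.Dict.counter ft).items.map Prod.fst = PySem.Set.ofList ft := by
    rw [PySem.Dict.items_counter]
    rw [List.map_map]
    exact List.map_id _
  have hkeysL : (List.foldl (fun d w => pvStep idx d w 1) d ft).keys
      = PySem.Set.update d.keys ft := keys_foldA idx ft d
  have hkeysR : (List.foldl (fun d p => pvStep idx d p.1 p.2) d (PySem.Dict.counter ft).items).keys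
      = PySem.Set.update d.keys ft := by
    rw [keys_foldB, hmapfst, set_update_ofList]
  have hndL : (List.foldl (fun d w => pvStep idx d w 1) d ft).keys.Nodup := by
    rw [hkeysL]; exact PySem.Set.nodup_update _ _ hnd
  have hndR : (List.foldl (fun d p => pvStep idx d p.1 p.2) d (PySem.Dict.counter ft).items).keys.Nodup := by
    rw [hkeysR]; exact PySem.Set.nodup_update _ _ hnd
  have hget : ∀ k, (List.foldl (fun d w => pvStep idx d w 1) d ft).get? k
      = (List.foldl (fun d p => pvStep idx d p.1 p.2) d (PySem.Dict.counter ft).items).get? k := by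
    intro k
    rw [get?_foldA, get?_foldB idx _ _ _ (hmapfst ▸ PySem.Set.nodup_ofList ft),
        PySem.Dict.items_counter, List.find?_map]
    have hpc : ((fun p => p.1 == k) ∘ fun w => ((w, (ft.count w : Int)) : String × Int))
        = fun w => w == k := rfl
    rw [hpc, find?_beq]
    by_cases hmem : k ∈ ft
    · rw [if_pos ((PySem.Set.mem_ofList ft k).mpr hmem)]
      rw [if_neg (by simpa [List.count_eq_zero] using hmem)]
      rfl
    · rw [if_neg (fun hh => hmem ((PySem.Set.mem_ofList ft k).mp hh))]
      rw [if_pos (List.count_eq_zero.mpr hmem)]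
      rfl
  rw [PySem.Dict.items_eq_map_keys _ hndL [], PySem.Dict.items_eq_map_keys _ hndR [],
      hkeysL, hkeysR]
  refine List.map_congr_left (fun k _ => ?_)
  simp only [PySem.Dict.getD, hget]

-- A's loop body, rearranged: skip stopwords, otherwise do the common step with n = 1
theorem bodyA_eq (is_spam : Int) (stopWords : List String)
    (d : PySem.Dict String (List Int)) (w : String) :
    (if d.contains w && !(stopWords.contains w) then
        (if is_spam = 1 then
          d.modify w [] (fun v => v.set 1 (v.getD 1 0 + 1))
        else
          d.modify w [] (fun v => v.set 0 (v.getD 0 0 + 1)))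
      else if !(stopWords.contains w) then
        (if is_spam = 1 then d.insert w [0, 1] else d.insert w [1, 0])
      else d)
      = if !(stopWords.contains w) then pvStep (if is_spam = 1 then 1 else 0) d w 1 else d := by
  by_cases hs : stopWords.contains w
  · have hs' : w ∈ stopWords := by simpa using hs
    simp [hs']
  · have hs' : w ∉ stopWords := by simpa using hs
    by_cases hc : d.contains w
    · by_cases hi : is_spam = 1 <;>
        simp [hs', hc, hi, pvStep, pvBump, PySem.Dict.modify]
    · by_cases hi : is_spam = 1 <;>
        simp [hs', hc, hi, pvStep, pvBump, PySem.Dict.getD_insert_self,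
          PySem.Dict.insert_insert_self]

-- B's merge body is the common step
theorem bodyB_eq (idx : Nat) (d : PySem.Dict String (List Int)) (p : String × Int) :
    (let d1 := if !(d.contains p.1) then d.insert p.1 ([0, 0] : List Int) else d
     d1.modify p.1 [] (fun v => v.set idx (v.getD idx 0 + p.2)))
      = pvStep idx d p.1 p.2 := by
  by_cases hc : d.contains p.1 <;>
    simp [hc, pvStep, pvBump, PySem.Dict.modify]

theorem base_nodup (counted : List (String × List Int)) :
    (PySem.Dict.empty.update counted).keys.Nodup :=
  PySem.Dict.nodup_keys_foldl_insert_key counted Prod.fst (fun _ x => x.2) _ List.nodup_nil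

theorem countedWords_eq_alt (text : List String) (is_spam : Int)
    (counted : List (String × List Int)) (stopWords : List String) :
    countedWords text is_spam counted stopWords = countedWords_alt text is_spam counted stopWords := by
  unfold countedWords countedWords_alt
  have hA : (fun (d : PySem.Dict String (List Int)) word =>
      if d.contains word && !(stopWords.contains word) then
        (if is_spam = 1 then
          d.modify word [] (fun v => v.set 1 (v.getD 1 0 + 1))
        else
          d.modify word [] (fun v => v.set 0 (v.getD 0 0 + 1)))
      else if !(stopWords.contains word) then
        (if is_spam = 1 then d.insert word [0, 1] else d.insert word [1, 0])
      else d)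
      = fun d w => if !(stopWords.contains w) then pvStep (if is_spam = 1 then 1 else 0) d w 1 else d :=
    funext fun d => funext fun w => bodyA_eq is_spam stopWords d w
  rw [hA, foldl_filter_guard]
  have hstop : (fun (c : PySem.Dict String Int) w =>
      if !((PySem.Set.ofList stopWords).contains w) then c.insert w (c.getD w 0 + 1) else c)
      = fun c w => if !(stopWords.contains w) then c.insert w (c.getD w 0 + 1) else c := by
    funext c w
    rw [contains_ofList]
  simp only [hstop]
  have hB : (fun (d : PySem.Dict String (List Int)) (p : String × Int) =>
      let d1 := if !(d.contains p.1) then d.insert p.1 ([0, 0] : List Int) else d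
      d1.modify p.1 [] (fun v => v.set (if is_spam = 1 then 1 else 0) (v.getD (if is_spam = 1 then 1 else 0) 0 + p.2)))
      = fun d p => pvStep (if is_spam = 1 then 1 else 0) d p.1 p.2 :=
    funext fun d => funext fun p => bodyB_eq _ d p
  simp only [hB]
  rw [foldl_filter_guard, PySem.Dict.foldl_insert_getD_add_one_eq_counter]
  exact fold_occurrences_eq_fold_counter _ _ _ (base_nodup counted)

-- ===== VERDICT (by name: the statement is the Claim_ definition above) =====
theorem countedWords_spec : Claim_equal_countedWords := by
  intro text is_spam counted stopWords _ _
  unfold Spec_countedWords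
  exact countedWords_eq_alt text is_spam counted stopWords
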